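-- pv_equiv track=rewrite | github.com/Idotopaz/Afeka-python | Home Work/Task 10/sequence.py | has_sequence
-- ===== SOURCE A (Python) =====
-- def has_sequence(the_list, num):
--     if num==0:
--         return True
--
--     if num not in the_list or len(the_list)<num:
--         return False
--
--     elif the_list[0] != 1:
--         the_list.remove(the_list[0])
--         return has_sequence(the_list,num)
--
--     elif the_list[num-1]==num:
--         return has_sequence(the_list, num-1)
--     else:
--         the_list.remove(the_list[0])
--         return has_sequence(the_list, num)
-- ===== SOURCE B (Python) =====
-- def has_sequence(the_list, num):
--     # Return-value equivalent to A; unlike A, does NOT mutate the_list.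
--     last = {}
--     for i, v in enumerate(the_list):
--         last[v] = i
--     n = num
--     L = len(the_list)
--     for i in range(L):
--         if n == 0:
--             return True
--         if last.get(n, -1) < i or L - i < n:
--             return False
--         if the_list[i] == 1:
--             while n > 0 and the_list[i + n - 1] == n:
--                 n -= 1
--     return n == 0
-- ===== Notes on version B (the rewrite author's own statement) =====
-- stated objective: alternative
-- what changed: Replaces A's front-popping recursion (which rescans the list for membership and calls remove at every step) with a non-mutating index-pointer pass that answers the membership test from a last-occurrence dictionary built once and collapses A's decrement chain into an inner while-loop; it trades A's per-step list mutation and rescans for one upfront O(n) index build.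
-- outside the precondition, e.g. on has_sequence([-1, 1], -1): A returns False, B returns False; on has_sequence([1, -2], -2): A raises IndexError, B returns False
import Mathlib
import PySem

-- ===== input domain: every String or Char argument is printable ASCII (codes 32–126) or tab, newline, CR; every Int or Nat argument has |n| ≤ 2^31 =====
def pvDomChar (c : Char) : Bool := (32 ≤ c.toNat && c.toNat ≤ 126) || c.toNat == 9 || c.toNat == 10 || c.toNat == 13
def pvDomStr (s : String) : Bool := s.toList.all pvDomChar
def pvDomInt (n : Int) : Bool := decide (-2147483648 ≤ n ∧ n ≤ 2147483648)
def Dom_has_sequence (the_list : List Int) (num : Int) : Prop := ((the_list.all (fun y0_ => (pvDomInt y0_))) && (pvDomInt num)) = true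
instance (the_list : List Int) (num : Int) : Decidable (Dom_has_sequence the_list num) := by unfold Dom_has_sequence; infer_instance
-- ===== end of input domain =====

-- B replaces A's front-popping recursion with one index-pointer pass over the list using a
-- precomputed last-occurrence dictionary and a batched countdown loop; B does not
-- mutate its argument, while A pops elements off the caller's list (return values agree on Pre_).


-- ===== PORT A =====
-- termination measure helper for A's well-founded recursion (not part of the computation)
def pvFilt (l : List Int) (n : Int) : Nat := (l.filter (fun x => decide (x ≤ n))).length

lemma pvFilt_tail_le (x : Int) (t : List Int) (n : Int) : pvFilt t n ≤ pvFilt (x :: t) n := by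
  simp only [pvFilt, List.filter_cons]; split <;> simp

lemma pvFilt_mono (l : List Int) (n : Int) : pvFilt l (n - 1) ≤ pvFilt l n := by
  apply List.Sublist.length_le
  apply List.monotone_filter_right
  intro x hx
  simp at hx ⊢; omega

lemma pvFilt_dec (l : List Int) (n : Int) (hm : n ∈ l) : pvFilt l (n - 1) < pvFilt l n := by
  induction l with
  | nil => simp at hm
  | cons x t ih =>
    have hmono := pvFilt_mono t n
    rcases List.mem_cons.mp hm with rfl | hmt
    · simp only [pvFilt, List.filter_cons] at *
      by_cases h1 : n ≤ n - 1
      · omega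
      · simp [h1] at *
        omega
    · have := ih hmt
      simp only [pvFilt, List.filter_cons] at *
      by_cases hx1 : x ≤ n - 1
      · have hx2 : x ≤ n := by omega
        simp [hx1, hx2] at *
        omega
      · by_cases hx2 : x ≤ n
        · simp [hx1, hx2] at *
          omega
        · simp [hx1, hx2] at *
          omega

-- `the_list.remove(the_list[0])` removes the first occurrence of the head, i.e. the head itself,
-- so it is ported as taking the tail.  `the_list[num-1]` is ported with pyGet?; `none` is exactly
-- Python's IndexError (excluded by Pre_), where the port returns false.
def has_sequence (the_list : List Int) (num : Int) : Bool :=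
  if num == 0 then true
  else if the_list.contains num = false ∨ (the_list.length : Int) < num then false
  else
    match hl : the_list with
    | [] => false          -- unreachable: `num in the_list` forces the list nonempty
    | h :: t =>
      if h ≠ 1 then has_sequence t num
      else
        match PySem.List.pyGet? (h :: t) (num - 1) with
        | none => false    -- Python raises IndexError here (excluded by Pre_)
        | some v => if v == num then has_sequence (h :: t) (num - 1) else has_sequence t num
termination_by 2 * the_list.length + pvFilt the_list num
decreasing_by
  · have := pvFilt_tail_le h t num
    simp; omega
  · rename_i hz hcond hne hv
    subst hl
    have hmem : num ∈ h :: t := by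
      rcases not_or.mp hcond with ⟨hc, _⟩
      simp at hc
      rcases eq_or_ne num h with rfl | hne2
      · exact List.mem_cons_self
      · exact List.mem_cons_of_mem _ (hc hne2)
    have := pvFilt_dec (h :: t) num hmem
    omega
  · have := pvFilt_tail_le h t num
    simp; omega

-- ===== PORT B =====
-- last = {}; for i, v in enumerate(the_list): last[v] = i
def pvLast (l : List Int) : PySem.Dict Int Int :=
  (PySem.List.enumerate l 0).foldl (fun d p => d.insert p.2 p.1) PySem.Dict.empty

-- while n > 0 and the_list[i + n - 1] == n: n -= 1
def pvWhile (l : List Int) (i : Nat) (n : Int) : Int :=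
  if 0 < n ∧ PySem.List.pyGet? l ((i : Int) + n - 1) = some n then pvWhile l i (n - 1) else n
termination_by n.toNat
decreasing_by omega

-- for i in range(L): …  (early returns; falls through to `return n == 0`)
def pvLoop (l : List Int) (last : PySem.Dict Int Int) (i : Nat) (n : Int) : Bool :=
  if _h : i < l.length then
    if n == 0 then true
    else if last.getD n (-1) < (i : Int) ∨ (l.length : Int) - (i : Int) < n then false
    else
      pvLoop l last (i + 1) (if PySem.List.pyGet? l (i : Int) = some 1 then pvWhile l i n else n)
  else n == 0
termination_by l.length - i

def has_sequence_alt (the_list : List Int) (num : Int) : Bool :=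
  pvLoop the_list (pvLast the_list) 0 num

-- ===== PRECONDITION & SPEC =====
-- Pre_ excludes negative num when both num and 1 occur in the list: on part of that region A's
-- negative-index expression the_list[num-1] raises IndexError (e.g. on ([1, -2], -2)); on the rest
-- of it A happens to return before reaching it.
def Pre_has_sequence (the_list : List Int) (num : Int) : Prop :=
  0 ≤ num ∨ num ∉ the_list ∨ (1 : Int) ∉ the_list
instance (the_list : List Int) (num : Int) : Decidable (Pre_has_sequence the_list num) := by unfold Pre_has_sequence; infer_instance

def pvWitness_has_sequence : List Int × Int := ([3, 1, 2, 3], 3)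

def Spec_has_sequence (the_list : List Int) (num : Int) (out : Bool) : Prop := out = has_sequence_alt the_list num
instance (the_list : List Int) (num : Int) (out : Bool) : Decidable (Spec_has_sequence the_list num out) := by unfold Spec_has_sequence; infer_instance

-- ===== CLAIM (what is proved, stated in full; the proofs are below) =====
def Claim_equal_has_sequence : Prop := ∀ (the_list : List Int) (num : Int), Dom_has_sequence the_list num → Pre_has_sequence the_list num → Spec_has_sequence the_list num (has_sequence the_list num)

-- ===== LEMMAS AND PROOFS =====

lemma hs_zero (l : List Int) : has_sequence l 0 = true := by
  rw [has_sequence.eq_def]; simp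

lemma hs_nil (n : Int) : has_sequence [] n = (n == 0) := by
  rw [has_sequence.eq_def]
  by_cases h : n = 0 <;> simp [h]

lemma pvLast_append (l : List Int) (x : Int) :
    pvLast (l ++ [x]) = (pvLast l).insert x (l.length : Int) := by
  unfold pvLast
  rw [PySem.List.enumerate_append, List.foldl_append]
  simp [PySem.List.enumerate_cons, PySem.List.enumerate_nil]

-- the last-occurrence dictionary decides membership in the suffix the index pointer has reached
lemma pvLast_getD (l : List Int) (v : Int) (i : Nat) :
    ((pvLast l).getD v (-1) < (i : Int)) ↔ v ∉ l.drop i := by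
  induction l using List.reverseRecOn with
  | nil =>
    simp [pvLast, PySem.List.enumerate_nil, PySem.Dict.getD_empty]
    omega
  | append_singleton l x ih =>
    rw [pvLast_append, PySem.Dict.getD_insert, List.drop_append]
    by_cases hvx : v = x
    · subst hvx
      rw [if_pos rfl]
      by_cases hi : i ≤ l.length
      · have h0 : i - l.length = 0 := by omega
        simp [h0]
        omega
      · have h1 : l.drop i = [] := List.drop_of_length_le (by omega)
        have h2 : ([v] : List Int).drop (i - l.length) = [] :=
          List.drop_of_length_le (by simp; omega)
        simp [h1, h2]
        omega
    · rw [if_neg hvx, ih]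
      constructor
      · intro h hmem
        rcases List.mem_append.mp hmem with h1 | h1
        · exact h h1
        · exact hvx (by have := List.mem_of_mem_drop h1; simpa using this)
      · intro h h1
        exact h (List.mem_append.mpr (Or.inl h1))

lemma pvWhile_nonneg (l : List Int) (i : Nat) (n : Int) (h : 0 ≤ n) : 0 ≤ pvWhile l i n := by
  fun_induction pvWhile with
  | case1 => rename_i hg ih; exact ih (by omega)
  | case2 => assumption

-- 1 ∉ l: A only ever pops the head, so the answer is false for num ≠ 0
lemma hs_no_one (l : List Int) (n : Int) (h1 : (1 : Int) ∉ l) (hn : n ≠ 0) :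
    has_sequence l n = false := by
  induction l with
  | nil => simp [hs_nil, hn]
  | cons x t ih =>
    rw [has_sequence.eq_def]
    simp only [beq_iff_eq, if_neg hn]
    split
    · rfl
    · have hx : x ≠ 1 := by
        intro h; exact h1 (by simp [h])
      simp [hx]
      exact ih (fun h => h1 (List.mem_cons_of_mem _ h))

lemma pvLoop_no_one (l : List Int) (d : PySem.Dict Int Int) (n : Int)
    (h1 : (1 : Int) ∉ l) (hn : n ≠ 0) :
    ∀ (k : Nat) (i : Nat), l.length - i ≤ k → pvLoop l d i n = false := by
  intro k
  induction k with
  | zero =>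
    intro i hik
    rw [pvLoop]
    have : ¬ i < l.length := by omega
    simp [this, hn]
  | succ k ih =>
    intro i hik
    rw [pvLoop]
    by_cases hi : i < l.length
    · simp only [dif_pos hi, beq_iff_eq, if_neg hn]
      split
      · rfl
      · have hget : PySem.List.pyGet? l (i : Int) = some l[i] := by
          rw [PySem.List.pyGet?_natCast]
          simp [hi]
        have hne1 : ¬ PySem.List.pyGet? l (i : Int) = some 1 := by
          rw [hget]
          intro h
          exact h1 (by
            have : l[i] = 1 := by simpa using h
            rw [← this]; exact List.getElem_mem hi)
        rw [if_neg hne1]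
        exact ih (i + 1) (by omega)
    · simp [hi, hn]


-- A's decrement chain at a fixed position equals one run of B's inner while-loop;
-- the main invariant pvLoop_eq: B's loop at pointer i computes A on the suffix l.drop i
lemma hs_cons (x : Int) (t : List Int) (n : Int) (hn : n ≠ 0)
    (hc : (x :: t).contains n = true) (hl : ¬ (((x :: t).length : Int) < n)) :
    has_sequence (x :: t) n =
      (if x ≠ 1 then has_sequence t n
       else match PySem.List.pyGet? (x :: t) (n - 1) with
         | none => false
         | some v => if v == n then has_sequence (x :: t) (n - 1) else has_sequence t n) := by
  rw [has_sequence.eq_def]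
  simp only [beq_iff_eq, if_neg hn, hc, hl, or_self, Bool.true_eq_false, if_false]

lemma hs_not_mem (l : List Int) (n : Int) (hn : n ≠ 0) (h : n ∉ l) :
    has_sequence l n = false := by
  rw [has_sequence.eq_def]
  have hc : l.contains n = false := by simpa using h
  rw [if_neg (show ¬ (n == 0) = true by simp [hn]), if_pos (Or.inl hc)]

lemma hs_len (l : List Int) (n : Int) (hn : n ≠ 0) (h : (l.length : Int) < n) :
    has_sequence l n = false := by
  rw [has_sequence.eq_def]
  rw [if_neg (show ¬ (n == 0) = true by simp [hn]), if_pos (Or.inr h)]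

lemma hs_chain (l : List Int) (i : Nat) (hil : i < l.length) (h1 : l[i] = 1) :
    ∀ (k : Nat) (n : Int), n.toNat ≤ k → 0 < n → n ≤ (l.length : Int) - (i : Int) → n ∈ l.drop i →
      has_sequence (l.drop i) n =
        (if pvWhile l i n = 0 then true else has_sequence (l.drop (i + 1)) (pvWhile l i n)) := by
  intro k
  induction k with
  | zero => intro n hk hpos _ _; omega
  | succ k ih =>
    intro n hk hpos hlen hmem
    have hdrop : l.drop i = l[i] :: l.drop (i + 1) := List.drop_eq_getElem_cons hil
    have hjlt : i + (n - 1).toNat < l.length := by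
      have := l.length
      omega
    have hGA : PySem.List.pyGet? (l.drop i) (n - 1) = some l[i + (n - 1).toNat] := by
      rw [PySem.List.pyGet?_of_nonneg (l.drop i) (show (0:Int) ≤ n - 1 by omega)]
      rw [List.getElem?_drop]
      exact List.getElem?_eq_getElem hjlt
    have hGB : PySem.List.pyGet? l ((i : Int) + n - 1) = some l[i + (n - 1).toNat] := by
      rw [PySem.List.pyGet?_of_nonneg l (show (0:Int) ≤ (i : Int) + n - 1 by omega)]
      have he : ((i : Int) + n - 1).toNat = i + (n - 1).toNat := by omega
      rw [he]
      exact List.getElem?_eq_getElem hjlt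
    have hmem' : (l[i] :: l.drop (i + 1)).contains n = true := by
      rw [← hdrop]; simpa using hmem
    have hlen' : ¬ (((l[i] :: l.drop (i + 1)).length : Int) < n) := by
      rw [← hdrop, List.length_drop]; omega
    conv_lhs => rw [hdrop]
    rw [hs_cons _ _ _ (by omega) hmem' hlen', if_neg (by simp [h1]), ← hdrop, hGA]
    simp only []
    by_cases hv : l[i + (n - 1).toNat] = n
    · have hW : pvWhile l i n = pvWhile l i (n - 1) := by
        rw [pvWhile.eq_def]
        rw [if_pos ⟨hpos, by rw [hGB, hv]⟩]
      rw [if_pos (show (l[i + (n - 1).toNat] == n) = true by rw [hv]; simp)]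
      by_cases hone : n = 1
      · subst hone
        have e : (1 : Int) - 1 = 0 := by norm_num
        rw [e] at hW
        have hW0 : pvWhile l i 0 = 0 := by
          rw [pvWhile.eq_def]; simp
        rw [e, hW, hW0, hs_zero]
        simp
      · by_cases hm2 : (n - 1) ∈ l.drop i
        · rw [hW]; exact ih (n - 1) (by omega) (by omega) (by omega) hm2
        · have hn1 : n - 1 ≠ 0 := by omega
          have hg2 : ¬ (0 < n - 1 ∧ PySem.List.pyGet? l ((i : Int) + (n - 1) - 1) = some (n - 1)) := by
            rintro ⟨-, hq⟩
            rw [PySem.List.pyGet?_of_nonneg l (show (0:Int) ≤ (i : Int) + (n - 1) - 1 by omega)] at hq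
            have hj2 : ((i : Int) + (n - 1) - 1).toNat < l.length := by omega
            have hq' : l[((i : Int) + (n - 1) - 1).toNat] = n - 1 := by
              have := List.getElem?_eq_getElem hj2
              rw [this] at hq
              simpa using hq
            apply hm2
            have hsome : (l.drop i)[((i : Int) + (n - 1) - 1).toNat - i]? = some (n - 1) := by
              rw [List.getElem?_drop]
              rw [show i + (((i : Int) + (n - 1) - 1).toNat - i) = ((i : Int) + (n - 1) - 1).toNat by omega]
              rw [List.getElem?_eq_getElem hj2, hq']
            exact List.mem_of_getElem? hsome
          have hW2 : pvWhile l i (n - 1) = n - 1 := by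
            rw [pvWhile.eq_def, if_neg hg2]
          rw [hW, hW2, if_neg hn1]
          rw [hs_not_mem _ _ hn1 hm2, hs_not_mem _ _ hn1 (fun hmm => hm2 (by rw [hdrop]; exact List.mem_cons_of_mem _ hmm))]
    · have hW : pvWhile l i n = n := by
        rw [pvWhile.eq_def, if_neg (by rintro ⟨-, hq⟩; rw [hGB] at hq; exact hv (by simpa using hq))]
      rw [if_neg (show ¬ (l[i + (n - 1).toNat] == n) = true by simp only [beq_iff_eq]; exact hv), hW, if_neg (by omega)]

lemma pvLoop_eq (l : List Int) :
    ∀ (k : Nat) (i : Nat) (n : Int), l.length - i ≤ k → 0 ≤ n →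
      pvLoop l (pvLast l) i n = has_sequence (l.drop i) n := by
  intro k
  induction k with
  | zero =>
    intro i n hik h0
    rw [pvLoop, dif_neg (by omega), List.drop_of_length_le (by omega), hs_nil]
  | succ k ih =>
    intro i n hik h0
    rw [pvLoop]
    by_cases hi : i < l.length
    · rw [dif_pos hi]
      by_cases hn0 : n = 0
      · subst hn0
        simp [hs_zero]
      · rw [if_neg (by simp [hn0])]
        have hmemiff := pvLast_getD l n i
        by_cases hcnd : (pvLast l).getD n (-1) < (i : Int) ∨ ((l.length : Int) - (i : Int) < n)
        · rw [if_pos hcnd]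
          rcases hcnd with hc | hc
          · exact (hs_not_mem _ _ hn0 (hmemiff.mp hc)).symm
          · refine (hs_len _ _ hn0 ?_).symm
            rw [List.length_drop]; omega
        · rw [if_neg hcnd]
          obtain ⟨hc1, hc2⟩ := not_or.mp hcnd
          have hmem : n ∈ l.drop i := by
            by_contra hmm
            exact absurd (hmemiff.mpr hmm) (by omega)
          have hdrop : l.drop i = l[i] :: l.drop (i + 1) := List.drop_eq_getElem_cons hi
          by_cases hx : PySem.List.pyGet? l ((i : Nat) : Int) = some 1
          · have h1 : l[i] = 1 := by
              rw [PySem.List.pyGet?_natCast, List.getElem?_eq_getElem hi] at hx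
              simpa using hx
            rw [if_pos hx]
            have hn' : 0 ≤ pvWhile l i n := pvWhile_nonneg _ _ _ h0
            have hch := hs_chain l i hi h1 n.toNat n (le_refl _) (by omega) (by omega) hmem
            rw [hch]
            by_cases hz : pvWhile l i n = 0
            · rw [if_pos hz, hz, ih (i + 1) 0 (by omega) (le_refl 0), hs_zero]
            · rw [if_neg hz]
              exact ih (i + 1) _ (by omega) hn'
          · rw [if_neg hx]
            have h1 : l[i] ≠ 1 := by
              intro hh
              apply hx
              rw [PySem.List.pyGet?_natCast, List.getElem?_eq_getElem hi, hh]
            have hmem' : (l[i] :: l.drop (i + 1)).contains n = true := by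
              rw [← hdrop]; simpa using hmem
            have hlen' : ¬ (((l[i] :: l.drop (i + 1)).length : Int) < n) := by
              rw [← hdrop, List.length_drop]; omega
            conv_rhs => rw [hdrop]
            rw [hs_cons _ _ _ hn0 hmem' hlen', if_pos h1]
            exact ih (i + 1) n (by omega) h0
    · rw [dif_neg hi, List.drop_of_length_le (by omega), hs_nil]

-- ===== VERDICT (by name: the statement is the Claim_ definition above) =====
theorem has_sequence_spec : Claim_equal_has_sequence := by
  intro l num _ hpre
  unfold Spec_has_sequence has_sequence_alt
  by_cases hnum : 0 ≤ num
  · exact (pvLoop_eq l l.length 0 num (by omega) hnum).symm.trans (by simp)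
  · have hne : num ≠ 0 := by omega
    rcases hpre with h | h | h
    · omega
    · have hc : l.contains num = false := by simpa using h
      rw [has_sequence.eq_def]
      simp only [beq_iff_eq, if_neg hne, hc]
      rw [pvLoop]
      by_cases h0 : 0 < l.length
      · have hd : (pvLast l).getD num (-1) < ((0 : Nat) : Int) := by
          rw [pvLast_getD]; simpa using h
        simp [h0, hne]
        omega
      · simp [show ¬ ((0 : Nat) < l.length) from h0, hne]
    · rw [hs_no_one l num h hne, pvLoop_no_one l (pvLast l) num h hne l.length 0 (by omega)]
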